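-- pv_equiv track=rewrite | github.com/UF-Xie-Lab/Translational-regulation-of-TDMD | CLASH.py | compressed_each_element
-- ===== SOURCE A (Python) =====
-- def compressed_each_element(dict1):
--     highest_abundance_each_hyb = 0
--     highest_abundance_hyb_name = ''
--     total_abundance_each_hyb = 0
--     for each_hyb, abundance in dict1.items():
--         if highest_abundance_each_hyb < abundance:
--             highest_abundance_each_hyb = abundance
--             highest_abundance_hyb_name = each_hyb
--         total_abundance_each_hyb += abundance
--     return highest_abundance_hyb_name, total_abundance_each_hyb
-- ===== SOURCE B (Python) =====
-- def compressed_each_element(dict1):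
--     # Simpler: compute the total with sum(), find the max abundance with max(),
--     # then pick the first key attaining it (or '' when the max is not positive).
--     total = sum(dict1.values())
--     m = max(dict1.values(), default=0)
--     if m <= 0:
--         name = ''
--     else:
--         name = next(k for k, v in dict1.items() if v == m)
--     return name, total
-- ===== Notes on version B (the rewrite author's own statement) =====
-- stated objective: simpler
-- what changed: Replaced the single interleaved accumulator loop by built-ins: total via sum(), the maximum via max(..., default=0), and the winning name by scanning for the first key attaining that maximum (or '' when the maximum is not positive).
import Mathlib
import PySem

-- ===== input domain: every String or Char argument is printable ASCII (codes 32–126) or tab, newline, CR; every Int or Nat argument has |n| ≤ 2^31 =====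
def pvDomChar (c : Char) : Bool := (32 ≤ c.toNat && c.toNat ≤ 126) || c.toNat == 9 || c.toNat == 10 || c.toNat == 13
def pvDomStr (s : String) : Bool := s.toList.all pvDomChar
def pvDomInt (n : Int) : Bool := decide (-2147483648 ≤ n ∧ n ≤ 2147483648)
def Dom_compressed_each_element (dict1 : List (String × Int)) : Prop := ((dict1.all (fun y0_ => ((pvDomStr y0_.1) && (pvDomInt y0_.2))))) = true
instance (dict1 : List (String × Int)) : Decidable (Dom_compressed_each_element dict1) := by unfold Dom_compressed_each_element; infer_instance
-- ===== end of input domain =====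

-- B is simpler: total by sum, max by max(default=0), name = first key attaining a positive max.

-- ===== PORT A =====
-- loop body of A's for-loop: state = (highest_abundance, highest_name, total)
def stepA (st : Int × String × Int) (p : String × Int) : Int × String × Int :=
  if st.1 < p.2 then (p.2, p.1, st.2.2 + p.2) else (st.1, st.2.1, st.2.2 + p.2)

def compressed_each_element (dict1 : List (String × Int)) : String × Int :=
  let r := dict1.foldl stepA ((0 : Int), "", (0 : Int))
  (r.2.1, r.2.2)

-- ===== PORT B =====
def compressed_each_element_alt (dict1 : List (String × Int)) : String × Int :=
  let total := (dict1.map Prod.snd).sum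
  let m := PySem.List.maxD (dict1.map Prod.snd) (fun v => v) 0
  let name :=
    if m ≤ 0 then ""
    else
      match dict1.find? (fun p => p.2 == m) with
      | some p => p.1
      | none => ""   -- unreachable: a positive max is attained by some entry
  (name, total)

-- ===== PRECONDITION & SPEC =====
def Spec_compressed_each_element (dict1 : List (String × Int)) (out : String × Int) : Prop := out = compressed_each_element_alt dict1
instance (dict1 : List (String × Int)) (out : String × Int) : Decidable (Spec_compressed_each_element dict1 out) := by unfold Spec_compressed_each_element; infer_instance

-- ===== CLAIM (what is proved, stated in full; the proofs are below) =====
def Claim_equal_compressed_each_element : Prop := ∀ (dict1 : List (String × Int)), Dom_compressed_each_element dict1 → Spec_compressed_each_element dict1 (compressed_each_element dict1)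

-- ===== LEMMAS AND PROOFS =====

theorem foldl_max_pull (t : List Int) : ∀ (a b : Int), t.foldl max (max a b) = max a (t.foldl max b) := by
  induction t with
  | nil => intro a b; rfl
  | cons v t ih =>
      intro a b
      simp only [List.foldl_cons, max_assoc]
      exact ih a (max b v)

-- A's loop, characterised: running max, first key strictly exceeding the start value, running total.
theorem loopA_eq (l : List (String × Int)) : ∀ (hi : Int) (name : String) (tot : Int),
    l.foldl stepA (hi, name, tot) =
      ((l.map Prod.snd).foldl max hi,
       (if hi < (l.map Prod.snd).foldl max hi
        then ((l.find? (fun p => p.2 == (l.map Prod.snd).foldl max hi)).map Prod.fst).getD name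
        else name),
       tot + (l.map Prod.snd).sum) := by
  induction l with
  | nil => intro hi name tot; simp
  | cons p t ih =>
      intro hi name tot
      have hsnd : ((p :: t).map Prod.snd) = p.2 :: t.map Prod.snd := rfl
      by_cases h : hi < p.2
      · -- the branch fires: state becomes (p.2, p.1, tot + p.2)
        have hstep : stepA (hi, name, tot) p = (p.2, p.1, tot + p.2) := by
          simp [stepA, h]
        have hmax : (t.map Prod.snd).foldl max (max hi p.2) = (t.map Prod.snd).foldl max p.2 := by
          rw [max_eq_right (le_of_lt h)]
        rw [List.foldl_cons, hstep, ih]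
        set M := (t.map Prod.snd).foldl max p.2 with hM
        have hpM : p.2 ≤ M := (PySem.List.le_foldl_max (t.map Prod.snd) p.2).1
        have hhiM : hi < M := lt_of_lt_of_le h hpM
        have hMfold : ((p :: t).map Prod.snd).foldl max hi = M := by
          rw [hsnd, List.foldl_cons, hmax]
        rw [hMfold]
        by_cases hpe : p.2 = M
        · -- p itself attains the max: find? hits it first
          have hfind : (p :: t).find? (fun q => q.2 == M) = some p := by
            simp [List.find?, hpe]
          simp [hfind, hhiM, hpe]
          ring
        · have hlt : p.2 < M := lt_of_le_of_ne hpM hpe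
          have hbe : (p.2 == M) = false := by simp [hpe]
          have hfind : (p :: t).find? (fun q => q.2 == M) = t.find? (fun q => q.2 == M) := by
            simp [List.find?, hbe]
          -- M is attained inside t, so find? on t succeeds and the default never matters
          have hmem : M ∈ t.map Prod.snd := by
            rcases PySem.List.foldl_max_mem (t.map Prod.snd) p.2 with h' | h'
            · exact absurd h'.symm hpe
            · exact h'
          rcases List.mem_map.mp hmem with ⟨q, hq, hq2⟩
          have hsome : ∃ r, t.find? (fun q => q.2 == M) = some r := by
            have : (t.find? (fun q => q.2 == M)).isSome := by
              rw [List.find?_isSome]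
              exact ⟨q, hq, by simp [hq2]⟩
            exact Option.isSome_iff_exists.mp this
          rcases hsome with ⟨r, hr⟩
          simp [hfind, hhiM, hlt, hr]
          omega
      · -- branch does not fire: p.2 ≤ hi, state keeps (hi, name), total grows
        have hstep : stepA (hi, name, tot) p = (hi, name, tot + p.2) := by
          simp [stepA, h]
        have hmax : (t.map Prod.snd).foldl max (max hi p.2) = (t.map Prod.snd).foldl max hi := by
          rw [max_eq_left (by omega : p.2 ≤ hi)]
        rw [List.foldl_cons, hstep, ih]
        have hMfold : ((p :: t).map Prod.snd).foldl max hi = (t.map Prod.snd).foldl max hi := by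
          rw [hsnd, List.foldl_cons, hmax]
        rw [hMfold]
        set M := (t.map Prod.snd).foldl max hi with hM
        by_cases hhiM : hi < M
        · have hpe : ¬ (p.2 = M) := by omega
          have hbe : (p.2 == M) = false := by simp [hpe]
          have hfind : (p :: t).find? (fun q => q.2 == M) = t.find? (fun q => q.2 == M) := by
            simp [List.find?, hbe]
          simp [hfind, hhiM]
          ring
        · simp [hhiM]
          ring

-- ===== VERDICT (by name: the statement is the Claim_ definition above) =====
theorem compressed_each_element_spec : Claim_equal_compressed_each_element := by
  intro dict1 _
  unfold Spec_compressed_each_element compressed_each_element compressed_each_element_alt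
  rw [loopA_eq]
  cases dict1 with
  | nil => simp [PySem.List.maxD, PySem.List.max?]
  | cons p t =>
      have hsnd : ((p :: t).map Prod.snd) = p.2 :: t.map Prod.snd := rfl
      have hmaxD : PySem.List.maxD ((p :: t).map Prod.snd) (fun v => v) 0
          = (t.map Prod.snd).foldl max p.2 := by
        simp [PySem.List.maxD, hsnd, PySem.List.max?_id_cons]
      set m := (t.map Prod.snd).foldl max p.2 with hm
      have hM0 : ((p :: t).map Prod.snd).foldl max 0 = max 0 m := by
        rw [hsnd, List.foldl_cons]
        have : max (0 : Int) p.2 = max 0 p.2 := rfl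
        rw [show ((max (0:Int) p.2)) = max 0 p.2 from rfl, foldl_max_pull]
      rw [hmaxD, hM0]
      by_cases hpos : m ≤ 0
      · have h0 : max (0 : Int) m = 0 := max_eq_left hpos
        simp [hpos]
      · have h0 : max (0 : Int) m = m := max_eq_right (by omega)
        have hlt : (0 : Int) < m := by omega
        rw [h0]
        simp only [hpos, hlt, if_pos]
        cases hfind : (p :: t).find? (fun q => q.2 == m) with
        | none => simp
        | some r => simp
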